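-- pv_equiv track=rewrite | github.com/coffeebearchen/video_agent2 | runner/task_v4_three_topic_eval_runner.py | evaluate_information_progression
-- ===== SOURCE A (Python) =====
-- from typing import Any
--
-- def flatten_highlights(scene_highlights: list[dict[str, Any]]) -> list[str]:
--     words: list[str] = []
--     for item in scene_highlights:
--         raw_items = item.get("highlights", [])
--         if not isinstance(raw_items, list):
--             continue
--         for word in raw_items:
--             normalized = str(word or "").strip()
--             if normalized:
--                 words.append(normalized)
--     return words
--
-- def unique_in_order(words: list[str]) -> list[str]:
--     result: list[str] = []
--     for word in words:
--         if word in result: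
--             continue
--         result.append(word)
--     return result
--
-- def evaluate_information_progression(scene_highlights: list[dict[str, Any]]) -> tuple[str, str]:
--     if not scene_highlights:
--         return "偏弱", "没有可评估的 scene_highlights"
--
--     midpoint = max(1, len(scene_highlights) // 2)
--     front_words = unique_in_order(flatten_highlights(scene_highlights[:midpoint]))
--     back_words = unique_in_order(flatten_highlights(scene_highlights[midpoint:]))
--     new_back_words = [word for word in back_words if word not in front_words]
--
--     if len(new_back_words) >= 2:
--         return "较好", f"后半段出现新信息：{new_back_words[:4]}"
--     if len(new_back_words) == 1:
--         return "一般", f"后半段有新增信息，但展开有限：{new_back_words[:2]}"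
--     return "偏弱", "后半段主要重复前半段，信息展开不足"
-- ===== SOURCE B (Python) =====
-- def evaluate_information_progression(scene_highlights):
--     if not scene_highlights:
--         return "偏弱", "没有可评估的 scene_highlights"
--
--     midpoint = max(1, len(scene_highlights) // 2)
--
--     # Single pass over ALL scenes: record, for each normalized word, the index of the
--     # scene where it first appears (dict preserves first-occurrence order).
--     first = {}
--     for i, item in enumerate(scene_highlights):
--         raw_items = item.get("highlights", [])
--         if not isinstance(raw_items, list):
--             continue
--         for word in raw_items:
--             w = str(word or "").strip()
--             if w and w not in first:
--                 first[w] = i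
--
--     # A word is "new in the back half" iff its first occurrence is at or after midpoint.
--     new_back_words = [w for w, i in first.items() if i >= midpoint]
--
--     if len(new_back_words) >= 2:
--         return "较好", f"后半段出现新信息：{new_back_words[:4]}"
--     if len(new_back_words) == 1:
--         return "一般", f"后半段有新增信息，但展开有限：{new_back_words[:2]}"
--     return "偏弱", "后半段主要重复前半段，信息展开不足"
-- ===== Notes on version B (the rewrite author's own statement) =====
-- stated objective: alternative
-- what changed: Replaces A's split-into-halves, per-half flatten+dedup passes and the front-membership filter by one single enumerated pass over all scenes that records each normalized word's first-occurrence scene index in a dict, then selects the words whose first occurrence is at or after the midpoint.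
import Mathlib
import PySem

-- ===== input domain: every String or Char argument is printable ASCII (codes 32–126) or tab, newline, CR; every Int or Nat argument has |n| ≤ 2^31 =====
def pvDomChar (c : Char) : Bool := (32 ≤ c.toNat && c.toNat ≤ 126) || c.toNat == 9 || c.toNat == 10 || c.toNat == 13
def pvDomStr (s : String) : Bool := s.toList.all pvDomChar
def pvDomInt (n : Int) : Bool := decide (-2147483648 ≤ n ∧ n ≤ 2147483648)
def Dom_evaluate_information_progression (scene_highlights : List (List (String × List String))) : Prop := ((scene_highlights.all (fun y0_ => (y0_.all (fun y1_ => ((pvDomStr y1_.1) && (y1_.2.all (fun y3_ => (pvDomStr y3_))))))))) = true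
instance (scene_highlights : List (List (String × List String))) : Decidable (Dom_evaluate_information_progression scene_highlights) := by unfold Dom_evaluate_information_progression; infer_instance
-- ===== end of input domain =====

-- B replaces A's split-into-halves, per-half flatten/dedup passes and front-membership filter by
-- ONE enumerated pass recording each word's first-occurrence scene index in a dict, then selecting
-- the words whose first occurrence is at or after the midpoint (objective: alternative).

-- Python's str(list) / f"{list}" formatting, ported by hand (PySem has no repr):
-- exact for strings of printable ASCII plus tab/newline/CR (the stated Dom), shared by both ports.
def pyReprChar (q : Char) (c : Char) : List Char :=
  if c = '\\' then ['\\', '\\']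
  else if c = q then ['\\', q]
  else if c = '\t' then ['\\', 't']
  else if c = '\n' then ['\\', 'n']
  else if c = '\r' then ['\\', 'r']
  else [c]

def pyReprStr (s : String) : String :=
  let q : Char := if '\'' ∈ s.toList ∧ '"' ∉ s.toList then '"' else '\''
  String.ofList ([q] ++ s.toList.flatMap (pyReprChar q) ++ [q])

def pyReprStrList (xs : List String) : String :=
  "[" ++ String.intercalate ", " (xs.map pyReprStr) ++ "]"

-- ===== PORT A =====
-- Python's `item.get("highlights", [])` is first-match lookup: PySem.Dict.getD on the assoc list.
-- The `isinstance(raw_items, list)` guard is vacuous under the type convention (every value is a list).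
def flatten_highlights (scene_highlights : List (List (String × List String))) : List String :=
  scene_highlights.foldl (fun words item =>
    ((PySem.Dict.mk item).getD "highlights" []).foldl (fun words word =>
      let normalized := PySem.Str.strip (if word == "" then "" else word)  -- str(word or "").strip()
      if normalized != "" then words ++ [normalized] else words) words) []

def unique_in_order (words : List String) : List String :=
  words.foldl (fun result word => if result.contains word then result else result ++ [word]) []

def evaluate_information_progression (scene_highlights : List (List (String × List String))) : String × String :=
  if scene_highlights.isEmpty then ("偏弱", "没有可评估的 scene_highlights")
  else
    let midpoint := max 1 (scene_highlights.length / 2)  -- len//2 on a Nat is Python's //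
    -- xs[:m] / xs[m:] with 0 ≤ m are take/drop
    let front_words := unique_in_order (flatten_highlights (scene_highlights.take midpoint))
    let back_words := unique_in_order (flatten_highlights (scene_highlights.drop midpoint))
    let new_back_words := back_words.filter (fun word => !front_words.contains word)
    if new_back_words.length ≥ 2 then
      ("较好", "后半段出现新信息：" ++ pyReprStrList (new_back_words.take 4))
    else if new_back_words.length == 1 then
      ("一般", "后半段有新增信息，但展开有限：" ++ pyReprStrList (new_back_words.take 2))
    else ("偏弱", "后半段主要重复前半段，信息展开不足")

-- ===== PORT B =====
-- one enumerated pass: dict word ↦ first-occurrence scene index (insertion order = first occurrence)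
def evaluate_information_progression_alt (scene_highlights : List (List (String × List String))) : String × String :=
  if scene_highlights.isEmpty then ("偏弱", "没有可评估的 scene_highlights")
  else
    let midpoint : Int := max 1 ((scene_highlights.length : Int) / 2)
    let first : PySem.Dict String Int :=
      (PySem.List.enumerate scene_highlights).foldl (fun d p =>
        ((PySem.Dict.mk p.2).getD "highlights" []).foldl (fun (d : PySem.Dict String Int) word =>
          let w := PySem.Str.strip (if word == "" then "" else word)
          if w != "" && !(d.contains w) then d.insert w p.1 else d) d) PySem.Dict.empty
    let new_back_words := (first.items.filter (fun q => q.2 ≥ midpoint)).map Prod.fst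
    if new_back_words.length ≥ 2 then
      ("较好", "后半段出现新信息：" ++ pyReprStrList (new_back_words.take 4))
    else if new_back_words.length == 1 then
      ("一般", "后半段有新增信息，但展开有限：" ++ pyReprStrList (new_back_words.take 2))
    else ("偏弱", "后半段主要重复前半段，信息展开不足")

-- ===== PRECONDITION & SPEC =====
def Spec_evaluate_information_progression (scene_highlights : List (List (String × List String))) (out : String × String) : Prop := out = evaluate_information_progression_alt scene_highlights
instance (scene_highlights : List (List (String × List String))) (out : String × String) : Decidable (Spec_evaluate_information_progression scene_highlights out) := by unfold Spec_evaluate_information_progression; infer_instance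

-- ===== CLAIM (what is proved, stated in full; the proofs are below) =====
def Claim_equal_evaluate_information_progression : Prop := ∀ (scene_highlights : List (List (String × List String))), Dom_evaluate_information_progression scene_highlights → Spec_evaluate_information_progression scene_highlights (evaluate_information_progression scene_highlights)

-- ===== LEMMAS AND PROOFS =====

-- the normalized word, and the normalized non-empty words of one scene's raw highlight list
def normW (word : String) : String := PySem.Str.strip (if word == "" then "" else word)

def flatW (raw : List String) : List String := (raw.map normW).filter (· != "")

def sceneW (item : List (String × List String)) : List String :=
  flatW ((PySem.Dict.mk item).getD "highlights" [])

-- B's flattened stream: (scene index, normalized word) pairs, in traversal order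
def scenePairs (shs : List (List (String × List String))) (s : Int) : List (Int × String) :=
  (PySem.List.enumerate shs s).flatMap (fun p => (sceneW p.2).map (fun w => (p.1, w)))

-- B's dict step on the flattened stream
def pstep (d : PySem.Dict String Int) (q : Int × String) : PySem.Dict String Int :=
  if !(d.contains q.2) then d.insert q.2 q.1 else d

-- spec of the items APPENDED by a first-occurrence dict pass starting from keys ks
def news (ks : List String) : List (Int × String) → List (String × Int)
  | [] => []
  | q :: ps => if q.2 ∈ ks then news ks ps else (q.2, q.1) :: news (ks ++ [q.2]) ps

-- first occurrences of l that are not in ks (A's dedup-then-filter, as one recursion)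
def gsel (ks : List String) : List String → List String
  | [] => []
  | w :: ws => if w ∈ ks then gsel ks ws else w :: gsel (ks ++ [w]) ws

theorem normW_def (word : String) :
    PySem.Str.strip (if word == "" then "" else word) = normW word := rfl

theorem flatW_cons (word : String) (raw : List String) :
    flatW (word :: raw) = if normW word != "" then normW word :: flatW raw else flatW raw := by
  simp only [flatW, List.map, List.filter]
  split <;> simp_all

-- ---- A side: canonical forms ----

theorem inner_flat (raw ws : List String) :
    raw.foldl (fun words word =>
      if normW word != "" then words ++ [normW word] else words) ws
    = ws ++ flatW raw := by
  induction raw generalizing ws with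
  | nil => simp [flatW]
  | cons word raw ih =>
      rw [List.foldl_cons, ih, flatW_cons]
      rcases h : (normW word != "") <;> simp only [Bool.false_eq_true, if_false, if_true, List.append_assoc,
        List.singleton_append]

theorem flatten_eq (shs : List (List (String × List String))) :
    flatten_highlights shs = shs.flatMap sceneW := by
  unfold flatten_highlights
  simp only [normW_def]
  suffices h : ∀ (l : List (List (String × List String))) (ws : List String),
      l.foldl (fun words item =>
        ((PySem.Dict.mk item).getD "highlights" []).foldl (fun words word =>
          if normW word != "" then words ++ [normW word] else words) words) ws
      = ws ++ l.flatMap sceneW by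
    simpa using h shs []
  intro l
  induction l with
  | nil => simp
  | cons item l ih =>
      intro ws
      rw [List.foldl_cons, inner_flat, ih, List.flatMap_cons, sceneW]
      simp

theorem uio_eq (ws : List String) : unique_in_order ws = PySem.Set.ofList ws := by
  rw [PySem.Set.ofList_eq_foldl]; rfl

theorem filter_foldl_add (Q : String → Bool) (l acc : List String) :
    (l.foldl PySem.Set.add acc).filter Q = (l.filter Q).foldl PySem.Set.add (acc.filter Q) := by
  induction l generalizing acc with
  | nil => rfl
  | cons x l ih =>
      rw [List.foldl_cons]
      rcases hq : Q x with _ | _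
      · rw [ih]
        congr 1
        · unfold PySem.Set.add
          split <;> simp [List.filter_append, List.filter, hq]
        · simp [List.filter, hq]
      · rw [ih]
        simp only [List.filter, hq, List.foldl_cons]
        congr 1
        have : PySem.Set.contains (acc.filter Q) x = PySem.Set.contains acc x := by
          simp [PySem.Set.contains, List.contains_eq_mem, List.mem_filter, hq]
        unfold PySem.Set.add
        rw [this]
        split <;> simp [List.filter_append, List.filter, hq]

theorem ofList_filter (Q : String → Bool) (l : List String) :
    PySem.Set.ofList (l.filter Q) = (PySem.Set.ofList l).filter Q := by
  rw [PySem.Set.ofList_eq_foldl, PySem.Set.ofList_eq_foldl, filter_foldl_add]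
  rfl

-- ---- gsel: dedup-relative-to-ks ----

theorem foldl_add_gsel (l ks : List String) :
    l.foldl PySem.Set.add ks = ks ++ gsel ks l := by
  induction l generalizing ks with
  | nil => simp [gsel]
  | cons w l ih =>
      rw [List.foldl_cons]
      by_cases h : w ∈ ks
      · have : PySem.Set.add ks w = ks := by
          simp [PySem.Set.add, List.contains_eq_mem, h]
        rw [this, ih, gsel]
        simp [h]
      · have : PySem.Set.add ks w = ks ++ [w] := by
          simp [PySem.Set.add, List.contains_eq_mem, h]
        rw [this, ih, gsel]
        simp [h]

theorem gsel_not_mem (l ks : List String) : ∀ w ∈ gsel ks l, w ∉ ks := by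
  induction l generalizing ks with
  | nil => simp [gsel]
  | cons x l ih =>
      intro w hw
      by_cases h : x ∈ ks
      · exact ih ks w (by simpa [gsel, h] using hw)
      · rcases (by simpa [gsel, h] using hw : w = x ∨ w ∈ gsel (ks ++ [x]) l) with rfl | hw'
        · exact h
        · intro hk
          exact ih (ks ++ [x]) w hw' (by simp [hk])

theorem gsel_eq_filter (F Bk : List String) :
    gsel (PySem.Set.ofList F) Bk
    = (PySem.Set.ofList Bk).filter (fun w => !((PySem.Set.ofList F : List String).contains w)) := by
  have h2 : (PySem.Set.ofList F : List String).filter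
      (fun w => !((PySem.Set.ofList F : List String).contains w)) = [] := by
    apply List.filter_eq_nil_iff.mpr
    intro x hx
    simp [List.contains_eq_mem, hx]
  calc gsel (PySem.Set.ofList F) Bk
      = ((PySem.Set.ofList F : List String) ++ gsel (PySem.Set.ofList F) Bk).filter
          (fun w => !((PySem.Set.ofList F : List String).contains w)) := by
        rw [List.filter_append, h2, List.nil_append]
        apply (List.filter_eq_self.mpr _).symm
        intro x hx
        simp [List.contains_eq_mem, gsel_not_mem Bk (PySem.Set.ofList F) x hx]
    _ = (Bk.foldl PySem.Set.add (PySem.Set.ofList F)).filter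
          (fun w => !((PySem.Set.ofList F : List String).contains w)) := by
        rw [foldl_add_gsel]
    _ = (PySem.Set.ofList Bk).filter (fun w => !((PySem.Set.ofList F : List String).contains w)) := by
        rw [filter_foldl_add, h2, ← ofList_filter]
        exact (PySem.Set.ofList_eq_foldl _).symm

-- ---- B side: dict pass ↦ news spec ----

theorem inner_dict (i : Int) (raw : List String) (d : PySem.Dict String Int) :
    raw.foldl (fun (d : PySem.Dict String Int) word =>
      if normW word != "" && !(d.contains (normW word)) then d.insert (normW word) i else d) d
    = (flatW raw).foldl (fun d w => pstep d (i, w)) d := by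
  induction raw generalizing d with
  | nil => simp [flatW]
  | cons word raw ih =>
      rw [List.foldl_cons, flatW_cons]
      rcases h : (normW word != "") with _ | _
      · simpa [h] using ih d
      · simp only [Bool.true_and]
        rw [ih]
        rfl

theorem dict_flat (shs : List (List (String × List String))) (s : Int) (d : PySem.Dict String Int) :
    (PySem.List.enumerate shs s).foldl (fun d p =>
      ((PySem.Dict.mk p.2).getD "highlights" []).foldl (fun (d : PySem.Dict String Int) word =>
        if normW word != "" && !(d.contains (normW word)) then d.insert (normW word) p.1 else d) d) d
    = (scenePairs shs s).foldl pstep d := by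
  induction shs generalizing s d with
  | nil => simp [scenePairs, PySem.List.enumerate_nil]
  | cons item shs ih =>
      rw [PySem.List.enumerate_cons, List.foldl_cons, inner_dict, ih]
      conv_rhs => rw [scenePairs, PySem.List.enumerate_cons, List.flatMap_cons]
      rw [List.foldl_append, List.foldl_map, ← scenePairs]
      rfl

theorem items_fold (ps : List (Int × String)) (d : PySem.Dict String Int) :
    (ps.foldl pstep d).items = d.items ++ news d.keys ps := by
  induction ps generalizing d with
  | nil => simp [news]
  | cons q ps ih =>
      rw [List.foldl_cons]
      by_cases h : q.2 ∈ d.keys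
      · have hc : d.contains q.2 = true := (PySem.Dict.contains_iff_mem_keys d q.2).mpr h
        rw [show pstep d q = d by simp [pstep, hc], ih, news]
        simp [h]
      · have hc : d.contains q.2 = false := by
          rcases hcc : d.contains q.2 with _ | _
          · rfl
          · exact absurd ((PySem.Dict.contains_iff_mem_keys d q.2).mp hcc) h
        rw [show pstep d q = d.insert q.2 q.1 by simp [pstep, hc], ih,
            PySem.Dict.items_insert_of_not_contains d q.1 hc,
            PySem.Dict.keys_insert_of_not_contains d q.1 hc, news]
        simp [h]

theorem news_append (ps qs : List (Int × String)) (ks : List String) :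
    news ks (ps ++ qs) = news ks ps ++ news (ks ++ (news ks ps).map Prod.fst) qs := by
  induction ps generalizing ks with
  | nil => simp [news]
  | cons p ps ih =>
      by_cases h : p.2 ∈ ks
      · simp only [List.cons_append, news, h, if_true, ih]
      · simp only [List.cons_append, news, h, if_false, ih, List.map_cons, List.cons_append,
          List.append_assoc]
        simp

theorem news_map_fst (ps : List (Int × String)) (ks : List String) :
    (news ks ps).map Prod.fst = gsel ks (ps.map Prod.snd) := by
  induction ps generalizing ks with
  | nil => simp [news, gsel]
  | cons p ps ih =>
      by_cases h : p.2 ∈ ks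
      · simp [news, gsel, h, ih]
      · simp [news, gsel, h, ih]

theorem news_filter_lt (m : Int) (ps : List (Int × String)) (ks : List String)
    (h : ∀ q ∈ ps, q.1 < m) :
    (news ks ps).filter (fun q => decide (q.2 ≥ m)) = [] := by
  induction ps generalizing ks with
  | nil => simp [news]
  | cons p ps ih =>
      have hp : p.1 < m := h p (by simp)
      have ht : ∀ q ∈ ps, q.1 < m := fun q hq => h q (by simp [hq])
      by_cases hm : p.2 ∈ ks
      · simp only [news, hm, if_true]
        exact ih ks ht
      · simp only [news, hm, if_false, List.filter]
        rw [ih (ks ++ [p.2]) ht]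
        simp [not_le.mpr hp]

theorem news_filter_ge (m : Int) (ps : List (Int × String)) (ks : List String)
    (h : ∀ q ∈ ps, m ≤ q.1) :
    (news ks ps).filter (fun q => decide (q.2 ≥ m)) = news ks ps := by
  induction ps generalizing ks with
  | nil => simp [news]
  | cons p ps ih =>
      have hp : m ≤ p.1 := h p (by simp)
      have ht : ∀ q ∈ ps, m ≤ q.1 := fun q hq => h q (by simp [hq])
      by_cases hm : p.2 ∈ ks
      · simp only [news, hm, if_true]
        exact ih ks ht
      · simp only [news, hm, if_false, List.filter]
        rw [ih (ks ++ [p.2]) ht]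
        simp [hp]

theorem scenePairs_snd (xs : List (List (String × List String))) (s : Int) :
    (scenePairs xs s).map Prod.snd = xs.flatMap sceneW := by
  induction xs generalizing s with
  | nil => simp [scenePairs, PySem.List.enumerate_nil]
  | cons x xs ih =>
      rw [scenePairs, PySem.List.enumerate_cons, List.flatMap_cons, List.map_append, ← scenePairs,
        ih, List.flatMap_cons]
      simp [Function.comp_def]

theorem scenePairs_fst_bounds (xs : List (List (String × List String))) (s : Int) :
    ∀ q ∈ scenePairs xs s, s ≤ q.1 ∧ q.1 < s + xs.length := by
  intro q hq
  rcases List.mem_flatMap.mp hq with ⟨p, hp, hq2⟩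
  rcases List.mem_map.mp hq2 with ⟨w, _, rfl⟩
  rcases (PySem.List.mem_enumerate_iff _ _ _).mp hp with ⟨k, hk, rfl⟩
  refine ⟨by simp, ?_⟩
  simp only []
  have : (k : Int) < (xs.length : Int) := by exact_mod_cast hk
  simp
  omega

theorem scenePairs_append (xs ys : List (List (String × List String))) (s : Int) :
    scenePairs (xs ++ ys) s = scenePairs xs s ++ scenePairs ys (s + xs.length) := by
  rw [scenePairs, PySem.List.enumerate_append, List.flatMap_append]
  rfl

-- the two new-back-word lists coincide
theorem nbw_eq (shs : List (List (String × List String))) (m : Nat) (hm : m ≤ shs.length) :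
    (((scenePairs shs 0).foldl pstep PySem.Dict.empty).items.filter
        (fun q => decide (q.2 ≥ (m : Int)))).map Prod.fst
    = (PySem.Set.ofList ((shs.drop m).flatMap sceneW)).filter
        (fun w => !((PySem.Set.ofList ((shs.take m).flatMap sceneW) : List String).contains w)) := by
  have hsplit : scenePairs shs 0
      = scenePairs (shs.take m) 0 ++ scenePairs (shs.drop m) ((shs.take m).length) := by
    conv_lhs => rw [← List.take_append_drop m shs]
    rw [scenePairs_append]
    norm_num
  have hlen : (shs.take m).length = m := by simp [hm]
  rw [items_fold, hsplit, news_append]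
  have hempty : (PySem.Dict.empty : PySem.Dict String Int).items = [] := rfl
  have hkeys : (PySem.Dict.empty : PySem.Dict String Int).keys = [] := rfl
  rw [hempty, hkeys]
  have hfront : ∀ q ∈ scenePairs (shs.take m) 0, q.1 < (m : Int) := by
    intro q hq
    have := (scenePairs_fst_bounds (shs.take m) 0 q hq).2
    rw [hlen] at this
    omega
  have hback : ∀ q ∈ scenePairs (shs.drop m) ((shs.take m).length), (m : Int) ≤ q.1 := by
    intro q hq
    have := (scenePairs_fst_bounds _ _ q hq).1
    rw [hlen] at this
    omega
  have hK : gsel [] ((shs.take m).flatMap sceneW)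
      = (PySem.Set.ofList ((shs.take m).flatMap sceneW) : List String) := by
    rw [PySem.Set.ofList_eq_foldl, foldl_add_gsel, List.nil_append]
  rw [List.nil_append, List.filter_append, news_filter_lt _ _ _ hfront,
      news_filter_ge _ _ _ hback, List.nil_append, news_map_fst, List.nil_append,
      news_map_fst, scenePairs_snd, scenePairs_snd, hK]
  exact gsel_eq_filter _ _

-- ===== VERDICT (by name: the statement is the Claim_ definition above) =====
theorem evaluate_information_progression_spec : Claim_equal_evaluate_information_progression := by
  intro shs _
  unfold Spec_evaluate_information_progression
  unfold evaluate_information_progression evaluate_information_progression_alt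
  rcases h : shs.isEmpty with _ | _
  · simp only [Bool.false_eq_true, if_false]
    have hn : 1 ≤ shs.length := by
      cases shs with
      | nil => simp [List.isEmpty] at h
      | cons a l => simp
    have hmid : max 1 ((shs.length : Int) / 2) = ((max 1 (shs.length / 2) : Nat) : Int) := by
      omega
    have hmle : max 1 (shs.length / 2) ≤ shs.length := by omega
    simp only [normW_def]
    rw [hmid, flatten_eq, flatten_eq, uio_eq, uio_eq, dict_flat, nbw_eq shs _ hmle]
    rfl
  · simp
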